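-- pv_equiv track=rewrite | github.com/loonghao/dcc-mcp-core | tests/test_gateway_prompts_aggregation.py | _unescape_cursor_safe
-- ===== SOURCE A (Python) =====
-- def _unescape_cursor_safe(escaped: str) -> str | None:
--     """Inverse of the ``escape_cursor_safe`` helper from gateway/namespace (#656)."""
--     out: list[str] = []
--     i = 0
--     n = len(escaped)
--     while i < n:
--         ch = escaped[i]
--         if ch == "_":
--             if i + 2 >= n or escaped[i + 2] != "_":
--                 return None
--             mapped = {"U": "_", "D": ".", "H": "-"}.get(escaped[i + 1])
--             if mapped is None:
--                 return None
--             out.append(mapped)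
--             i += 3
--         elif ch.isascii() and ch.isalnum():
--             out.append(ch)
--             i += 1
--         else:
--             return None
--     return "".join(out)
-- ===== SOURCE B (Python) =====
-- def _unescape_cursor_safe(escaped: str) -> str | None:
--     """Split on '_' : parts at even positions are literal alnum runs, parts at
--     odd positions must be single escape codes U/D/H; decode pairwise."""
--     mapping = {"U": "_", "D": ".", "H": "-"}
--
--     def lit_ok(p: str) -> bool:
--         return all(ch.isascii() and ch.isalnum() for ch in p)
--
--     def decode(ps: list) -> str | None:
--         if len(ps) == 1:
--             return ps[0] if lit_ok(ps[0]) else None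
--         if len(ps) >= 3 and lit_ok(ps[0]):
--             mapped = mapping.get(ps[1])
--             if mapped is not None:
--                 tail = decode(ps[2:])
--                 return None if tail is None else ps[0] + mapped + tail
--         return None
--
--     return decode(escaped.split("_"))
-- ===== Notes on version B (the rewrite author's own statement) =====
-- stated objective: alternative
-- what changed: A scans character by character in an explicit index loop with a three-way branch per position; B splits the string on the underscore separator once and decodes the resulting parts pairwise (even parts must be alnum runs, odd parts single U/D/H escape codes).
import Mathlib
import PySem

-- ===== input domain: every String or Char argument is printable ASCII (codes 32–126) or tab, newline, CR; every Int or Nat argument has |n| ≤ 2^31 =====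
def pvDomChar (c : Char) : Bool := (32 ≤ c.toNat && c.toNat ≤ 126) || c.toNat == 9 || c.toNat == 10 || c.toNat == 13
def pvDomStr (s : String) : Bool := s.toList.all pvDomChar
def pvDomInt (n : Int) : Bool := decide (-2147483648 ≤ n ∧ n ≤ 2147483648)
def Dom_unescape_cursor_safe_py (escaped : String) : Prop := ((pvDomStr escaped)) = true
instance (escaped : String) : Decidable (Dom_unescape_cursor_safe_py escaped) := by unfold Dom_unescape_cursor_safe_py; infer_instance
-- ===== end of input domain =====

-- B replaces A's index-driven character scan by one split on '_' followed by a
-- pairwise recursive decode of the parts (objective: alternative decomposition).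

-- ===== PORT A =====
-- A's while loop, as structural recursion on the remaining characters;
-- 'ch.isascii() and ch.isalnum()' is ported exactly as 'c.toNat ≤ 127 && isalnum c',
-- 'i + 2 >= n' is the match arity check, and the dict .get is the if-chain.
def aLoop : List Char → Option (List Char)
  | [] => some []
  | c :: rest =>
    if c = '_' then
      match rest with
      | x :: c2 :: rest' =>
          if c2 ≠ '_' then none
          else
            match (if x = 'U' then some '_' else if x = 'D' then some '.' else if x = 'H' then some '-' else none) with
            | some m => (aLoop rest').map (m :: ·)
            | none => none
      | _ => none
    else if c.toNat ≤ 127 && PySem.Chars.isalnum c then (aLoop rest).map (c :: ·) else none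

def unescape_cursor_safe_py (escaped : String) : Option String :=
  (aLoop escaped.toList).map String.ofList

-- ===== PORT B =====
-- lit_ok of Source B
def bLitOk (p : List Char) : Bool := p.all (fun c => c.toNat ≤ 127 && PySem.Chars.isalnum c)

-- mapping.get(ps[1]) of Source B (the three-entry dict lookup; keys are the 1-char parts)
def bCode (p : List Char) : Option Char :=
  match p with
  | ['U'] => some '_'
  | ['D'] => some '.'
  | ['H'] => some '-'
  | _ => none

-- decode of Source B: len 1 → a literal part; len ≥ 3 → literal, escape code, rest; else None
def bDecode : List (List Char) → Option (List Char)
  | [p] => if bLitOk p then some p else none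
  | p :: e :: r :: rs =>
      if bLitOk p then
        match bCode e with
        | some m => (bDecode (r :: rs)).map (fun t => p ++ m :: t)
        | none => none
      else none
  | _ => none

def unescape_cursor_safe_py_alt (escaped : String) : Option String :=
  (bDecode (PySem.Chars.splitOn escaped.toList ['_'])).map String.ofList

-- ===== PRECONDITION & SPEC =====
def Spec_unescape_cursor_safe_py (escaped : String) (out : Option String) : Prop := out = unescape_cursor_safe_py_alt escaped
instance (escaped : String) (out : Option String) : Decidable (Spec_unescape_cursor_safe_py escaped out) := by unfold Spec_unescape_cursor_safe_py; infer_instance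

-- ===== CLAIM (what is proved, stated in full; the proofs are below) =====
def Claim_equal_unescape_cursor_safe_py : Prop := ∀ (escaped : String), Dom_unescape_cursor_safe_py escaped → Spec_unescape_cursor_safe_py escaped (unescape_cursor_safe_py escaped)

-- ===== LEMMAS AND PROOFS =====

-- prepend a list to the first part (the splitter's current chunk grows)
def conz (p : List Char) : List (List Char) → List (List Char)
  | q :: qs => (p ++ q) :: qs
  | [] => [p]

-- reference splitter for the single-char separator '_'
def mySplit : List Char → List (List Char)
  | [] => [[]]
  | c :: rest => if c = '_' then [] :: mySplit rest else conz [c] (mySplit rest)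

theorem mySplit_ne_nil (l : List Char) : mySplit l ≠ [] := by
  cases l with
  | nil => simp [mySplit]
  | cons c rest =>
    simp only [mySplit]
    split
    · simp
    · cases h : mySplit rest <;> simp [conz]

theorem conz_conz (p q : List Char) (parts : List (List Char)) :
    conz p (conz q parts) = conz (p ++ q) parts := by
  cases parts <;> simp [conz]

theorem conz_nil (parts : List (List Char)) (h : parts ≠ []) : conz [] parts = parts := by
  cases parts <;> simp_all [conz]

theorem go_spec (fuel : Nat) : ∀ (l cur : List Char) (acc : List (List Char)),
    l.length ≤ fuel →
    PySem.Chars.splitOn.go ['_'] fuel l cur acc = acc.reverse ++ conz cur.reverse (mySplit l) := by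
  induction fuel with
  | zero =>
    intro l cur acc h
    have : l = [] := by cases l <;> simp_all
    subst this
    simp [PySem.Chars.splitOn.go, mySplit, conz]
  | succ n ih =>
    intro l cur acc h
    match l with
    | [] => simp [PySem.Chars.splitOn.go, mySplit, conz]
    | c :: rest =>
      rw [PySem.Chars.splitOn.go]
      simp only [List.length_cons] at h
      by_cases hc : c = '_'
      · subst hc
        have hp : List.isPrefixOf ['_'] ('_' :: rest) = true := by simp [List.isPrefixOf]
        rw [if_pos hp]
        have hd : List.drop ['_'].length ('_' :: rest) = rest := rfl
        rw [hd, ih rest [] (cur.reverse :: acc) (by omega), List.reverse_nil,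
          conz_nil _ (mySplit_ne_nil rest)]
        simp [mySplit, conz]
      · have hp : ¬ (List.isPrefixOf ['_'] (c :: rest) = true) := by
          simp [List.isPrefixOf]; exact fun h' => hc h'.symm
        rw [if_neg hp, ih rest (c :: cur) acc (by omega)]
        simp only [mySplit, if_neg hc, List.reverse_cons]
        rw [conz_conz]

theorem splitOn_eq (l : List Char) : PySem.Chars.splitOn l ['_'] = mySplit l := by
  rw [PySem.Chars.splitOn, go_spec (l.length + 1) l [] [] (by omega)]
  simp [conz_nil _ (mySplit_ne_nil l)]

theorem bCode_single (x : Char) :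
    bCode [x] = (if x = 'U' then some '_' else if x = 'D' then some '.' else if x = 'H' then some '-' else none) := by
  unfold bCode
  split <;> simp_all

theorem bCode_long (x c : Char) (r : List Char) : bCode (x :: c :: r) = none := by
  unfold bCode
  split <;> simp_all

-- the first part of the split, exposed as a cons
theorem mySplit_head (l : List Char) : ∃ h t, mySplit l = h :: t := by
  cases hm : mySplit l with
  | nil => exact absurd hm (mySplit_ne_nil l)
  | cons h t => exact ⟨h, t, rfl⟩

theorem aLoop_cons_ne {c : Char} (h : ¬ c = '_') (rest : List Char) :
    aLoop (c :: rest) = if c.toNat ≤ 127 && PySem.Chars.isalnum c then (aLoop rest).map (c :: ·) else none := by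
  rw [aLoop.eq_def]
  simp [h]

theorem main_lemma (l : List Char) : aLoop l = bDecode (mySplit l) := by
  match l with
  | [] => simp [aLoop, mySplit, bDecode, bLitOk]
  | c :: rest =>
    by_cases hc : c = '_'
    · subst hc
      match rest with
      | [] =>
        rw [show aLoop ['_'] = none from rfl]
        simp [mySplit, bDecode]
      | [x] =>
        rw [show aLoop ['_', x] = none from rfl]
        by_cases hx : x = '_'
        · subst hx
          rw [show mySplit ['_', '_'] = [[], [], []] from by simp [mySplit]]
          rw [bDecode, if_pos (show bLitOk [] = true from rfl)]
          rfl
        · simp [mySplit, hx, conz, bDecode]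
      | x :: c2 :: rest' =>
        by_cases h2 : c2 = '_'
        · subst h2
          rw [show aLoop ('_' :: x :: '_' :: rest') =
              (match (if x = 'U' then some '_' else if x = 'D' then some '.' else if x = 'H' then some '-' else none) with
               | some m => (aLoop rest').map (m :: ·)
               | none => none) from rfl]
          by_cases hx : x = '_'
          · subst hx
            rw [show mySplit ('_' :: '_' :: '_' :: rest') = [] :: [] :: [] :: mySplit rest' from by simp [mySplit]]
            rw [bDecode, if_pos (show bLitOk [] = true from rfl)]
            rfl
          · rw [show mySplit ('_' :: x :: '_' :: rest') = [] :: [x] :: mySplit rest' from by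
              simp [mySplit, hx, conz]]
            obtain ⟨hh, tt, hrr⟩ := mySplit_head rest'
            rw [hrr, bDecode, if_pos (show bLitOk [] = true from rfl), ← hrr]
            rw [bCode_single, ← main_lemma rest']
            cases hu : (if x = 'U' then some '_' else if x = 'D' then some '.' else if x = 'H' then some '-' else none) <;> simp
        · rw [show aLoop ('_' :: x :: c2 :: rest') =
              (if c2 ≠ '_' then none
               else match (if x = 'U' then some '_' else if x = 'D' then some '.' else if x = 'H' then some '-' else none) with
                    | some m => (aLoop rest').map (m :: ·)
                    | none => none) from rfl]
          rw [if_pos h2]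
          have hsp : ∃ hh tt, mySplit ('_' :: x :: c2 :: rest') = [] :: hh :: tt ∧ bCode hh = none := by
            by_cases hx : x = '_'
            · subst hx
              obtain ⟨h3, t3, h33⟩ := mySplit_head (c2 :: rest')
              exact ⟨[], h3 :: t3, by
                rw [show mySplit ('_' :: '_' :: c2 :: rest') = [] :: [] :: mySplit (c2 :: rest') from by
                  simp [mySplit], h33], rfl⟩
            · obtain ⟨h3, t3, h33⟩ := mySplit_head rest'
              refine ⟨x :: c2 :: h3, t3, ?_, bCode_long _ _ _⟩
              simp [mySplit, hx, h2, h33, conz]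
          obtain ⟨hh, tt, hsp, hcode⟩ := hsp
          rw [hsp]
          cases tt with
          | nil => rfl
          | cons r rs => rw [bDecode, if_pos (show bLitOk [] = true from rfl), hcode]
    · rw [aLoop_cons_ne hc]
      have hsp : mySplit (c :: rest) = conz [c] (mySplit rest) := by simp [mySplit, hc]
      obtain ⟨hh, tt, hrr⟩ := mySplit_head rest
      rw [hsp, hrr]
      simp only [conz, List.singleton_append]
      have hIH := main_lemma rest
      rw [hrr] at hIH
      by_cases hok : (c.toNat ≤ 127 && PySem.Chars.isalnum c) = true
      · rw [if_pos hok]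
        cases tt with
        | nil =>
          rw [bDecode] at hIH ⊢
          have hb : bLitOk (c :: hh) = (decide (c.toNat ≤ 127) && PySem.Chars.isalnum c && bLitOk hh) := by
            simp [bLitOk, Bool.and_assoc]
          rw [hb]
          simp only [hok]
          split_ifs at hIH ⊢ <;> simp_all
        | cons e tt' =>
          cases tt' with
          | nil => simp [bDecode] at hIH ⊢; rw [hIH]
          | cons r rs =>
            rw [bDecode] at hIH ⊢
            have hb : bLitOk (c :: hh) = (decide (c.toNat ≤ 127) && PySem.Chars.isalnum c && bLitOk hh) := by
              simp [bLitOk, Bool.and_assoc]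
            rw [hb]
            simp only [hok]
            by_cases hl : bLitOk hh = true
            · rw [if_pos hl] at hIH
              rw [if_pos (by simp [hl])]
              cases hcd : bCode e with
              | none => rw [hcd] at hIH; simp [hIH]
              | some m =>
                rw [hcd] at hIH
                rw [hIH]
                cases bDecode (r :: rs) <;> simp
            · rw [if_neg hl] at hIH
              rw [if_neg (by simp [hl])]
              simp [hIH]
      · rw [if_neg hok]
        have hb : ¬ (bLitOk (c :: hh) = true) := by
          have heq : bLitOk (c :: hh) = ((decide (c.toNat ≤ 127) && PySem.Chars.isalnum c) && bLitOk hh) := by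
            simp [bLitOk, Bool.and_assoc]
          simp [heq, Bool.eq_false_iff.mpr hok]
        cases tt with
        | nil => rw [bDecode, if_neg hb]
        | cons e tt' =>
          cases tt' with
          | nil => rfl
          | cons r rs => rw [bDecode, if_neg hb]
termination_by l.length
decreasing_by all_goals (simp only [List.length_cons]; omega)

-- ===== VERDICT (by name: the statement is the Claim_ definition above) =====
theorem unescape_cursor_safe_py_spec : Claim_equal_unescape_cursor_safe_py := by
  intro escaped _
  unfold Spec_unescape_cursor_safe_py unescape_cursor_safe_py unescape_cursor_safe_py_alt
  rw [splitOn_eq, main_lemma]
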